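-- pv_equiv track=rewrite | github.com/redpanda-ai/Meerkat | meerkat/classification/bloom_filter/trie.py | get_short_forms
-- ===== SOURCE A (Python) =====
-- SHORTENINGS = {
-- 	"EAST": "E",
-- 	"WEST": "W",
-- 	"NORTH": "N",
-- 	"SOUTH": "S",
-- 	"SAINT": "ST",
-- 	"FORT": "FT",
-- 	"BEACH": "BCH",
-- }
--
-- def get_short_forms(city):
-- 	"""Generate a list of all possible strings where we abbreviate certain words.
-- 	For example: if city="WEST FORT WORTH",
-- 		then return [ "WESTFORTWORTH", WESTFTWORTH, WFORTWORTH, WFTWORTH ] """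
-- 	city = city.upper().replace('.', '')
-- 	tokens = city.split()
-- 	token_length = len(tokens)
-- 	token_lists = []
-- 	def depth_first_search(token_index=0, token_list=[]):
-- 		"""traverse the tokens and replace long terms with shortened or abbreviated terms"""
-- 		#Base case, we are done
-- 		if token_index == token_length:
-- 			token_lists.append(token_list)
-- 			return
-- 		#move forward in our list of tokens
-- #		token_index += 1
-- 		#Generate the list where we SKIP abbreviations
-- 		depth_first_search(token_index=token_index + 1, token_list=token_list + [tokens[token_index]])
-- 		#Generate the list where we ABBREVIATE, if we can
-- 		if tokens[token_index] in SHORTENINGS: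
-- 			depth_first_search(token_index=token_index + 1,
-- 				token_list=token_list + [SHORTENINGS[tokens[token_index]]])
--
-- 	#Find all possible short forms of the city name
-- 	depth_first_search()
-- 	#Return a list of strings
-- 	return [''.join(token_list) for token_list in token_lists]
-- ===== SOURCE B (Python) =====
-- SHORTENINGS = {
-- 	"EAST": "E",
-- 	"WEST": "W",
-- 	"NORTH": "N",
-- 	"SOUTH": "S",
-- 	"SAINT": "ST",
-- 	"FORT": "FT",
-- 	"BEACH": "BCH",
-- }
--
-- def get_short_forms(city):
-- 	"""Generate a list of all possible strings where we abbreviate certain words."""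
-- 	city = city.upper().replace('.', '')
-- 	combos = ['']
-- 	for token in city.split():
-- 		options = [token, SHORTENINGS[token]] if token in SHORTENINGS else [token]
-- 		combos = [prefix + option for prefix in combos for option in options]
-- 	return combos
-- ===== Notes on version B (the rewrite author's own statement) =====
-- stated objective: simpler
-- what changed: Replaces the recursive DFS with an inner appended-to list by an iterative cartesian-product fold: one pass over the tokens extends every partial combination string with each option, so the nested recursion, the token-list accumulator and the final join disappear.
import Mathlib
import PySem

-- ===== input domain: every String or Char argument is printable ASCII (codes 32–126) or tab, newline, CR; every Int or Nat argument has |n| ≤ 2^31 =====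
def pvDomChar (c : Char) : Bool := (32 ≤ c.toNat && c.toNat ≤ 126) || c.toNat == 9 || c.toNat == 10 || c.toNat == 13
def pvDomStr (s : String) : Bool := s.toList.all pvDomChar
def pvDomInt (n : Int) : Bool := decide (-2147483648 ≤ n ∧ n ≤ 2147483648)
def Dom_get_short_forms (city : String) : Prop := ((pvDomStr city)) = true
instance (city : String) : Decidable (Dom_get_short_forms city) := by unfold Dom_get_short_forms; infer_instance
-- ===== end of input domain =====

-- B replaces A's recursive DFS by an iterative cartesian-product fold over the tokens (simpler decomposition, same cost).

-- shared module constant of both Pythons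
def pvSHORTENINGS : PySem.Dict String String :=
  PySem.Dict.ofList [("EAST","E"),("WEST","W"),("NORTH","N"),("SOUTH","S"),("SAINT","ST"),("FORT","FT"),("BEACH","BCH")]

-- Python '+' on str: exact concatenation of the code points
def pvCat (a b : String) : String := String.ofList (a.toList ++ b.toList)

-- ===== PORT A =====
-- A's depth_first_search recurses on token_index over the fixed token list; the structural
-- recursion on the remaining tokens below is the same traversal, same branch order.
def pvDfsA : List String → List String → List (List String)
  | [], tokenList => [tokenList]
  | t :: ts, tokenList =>
      pvDfsA ts (tokenList ++ [t]) ++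
        (if pvSHORTENINGS.contains t then pvDfsA ts (tokenList ++ [pvSHORTENINGS.getD t ""]) else [])

def get_short_forms (city : String) : List String :=
  let city' := PySem.Str.replace (PySem.Str.upper city) "." ""
  let tokens := PySem.Str.split₀ city'
  (pvDfsA tokens []).map (fun tokenList => PySem.Str.join "" tokenList)

-- ===== PORT B =====
def get_short_forms_alt (city : String) : List String :=
  let city' := PySem.Str.replace (PySem.Str.upper city) "." ""
  (PySem.Str.split₀ city').foldl
    (fun combos token =>
      let options := if pvSHORTENINGS.contains token
                     then [token, pvSHORTENINGS.getD token ""] else [token]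
      combos.flatMap (fun prefixStr => options.map (fun option => pvCat prefixStr option)))
    [""]

-- ===== PRECONDITION & SPEC =====
def Spec_get_short_forms (city : String) (out : List String) : Prop := out = get_short_forms_alt city
instance (city : String) (out : List String) : Decidable (Spec_get_short_forms city out) := by unfold Spec_get_short_forms; infer_instance

-- ===== CLAIM (what is proved, stated in full; the proofs are below) =====
def Claim_equal_get_short_forms : Prop := ∀ (city : String), Dom_get_short_forms city → Spec_get_short_forms city (get_short_forms city)

-- ===== LEMMAS AND PROOFS =====

theorem pvDfsA_shift (ts : List String) (tl1 tl2 : List String) :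
    pvDfsA ts (tl1 ++ tl2) = (pvDfsA ts tl2).map (tl1 ++ ·) := by
  induction ts generalizing tl2 with
  | nil => simp [pvDfsA]
  | cons t ts ih =>
    simp only [pvDfsA, List.append_assoc]
    rw [ih (tl2 ++ [t])]
    split_ifs with h
    · rw [ih (tl2 ++ [pvSHORTENINGS.getD t ""])]; simp
    · simp

theorem pvJoin_nil : PySem.Str.join "" ([] : List String) = "" := by
  simp [PySem.Str.join, PySem.Chars.join, List.intercalate]

theorem pvJoin_cons (x : String) (l : List String) :
    PySem.Str.join "" (x :: l) = pvCat x (PySem.Str.join "" l) := by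
  cases l with
  | nil => simp [PySem.Str.join, pvCat, PySem.Chars.join, List.intercalate]
  | cons y l => simp [PySem.Str.join, pvCat, PySem.Chars.join_cons_cons]

theorem pvCat_left_empty (s : String) : pvCat "" s = s := by
  simp [pvCat]

theorem pvCat_right_empty (s : String) : pvCat s "" = s := by
  simp [pvCat]

theorem pvCat_assoc (a b c : String) : pvCat a (pvCat b c) = pvCat (pvCat a b) c := by
  simp [pvCat]

theorem pvMap_join_shift (c x : String) (P : List (List String)) :
    P.map (fun l => pvCat c (PySem.Str.join "" (x :: l)))
      = P.map (fun l => pvCat (pvCat c x) (PySem.Str.join "" l)) := by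
  apply List.map_congr_left
  intro l _
  rw [pvJoin_cons, pvCat_assoc]

theorem pvFold_eq (ts : List String) (cs : List String) :
    ts.foldl
      (fun combos token =>
        let options := if pvSHORTENINGS.contains token
                       then [token, pvSHORTENINGS.getD token ""] else [token]
        combos.flatMap (fun p => options.map (fun o => pvCat p o))) cs
    = cs.flatMap (fun c => (pvDfsA ts []).map (fun l => pvCat c (PySem.Str.join "" l))) := by
  induction ts generalizing cs with
  | nil =>
    simp [pvDfsA, pvJoin_nil, pvCat_right_empty]
  | cons t ts ih =>
    rw [List.foldl_cons, ih]
    rw [List.flatMap_assoc]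
    congr 1
    funext c
    have h1 : pvDfsA ts [t] = (pvDfsA ts []).map ([t] ++ ·) := by
      simpa using pvDfsA_shift ts [t] []
    have h2 : pvDfsA ts [pvSHORTENINGS.getD t ""]
        = (pvDfsA ts []).map ([pvSHORTENINGS.getD t ""] ++ ·) := by
      simpa using pvDfsA_shift ts [pvSHORTENINGS.getD t ""] []
    by_cases h : pvSHORTENINGS.contains t
    · simp only [pvDfsA, h, if_true, List.nil_append, h1, h2, List.map_append, List.map_map,
        Function.comp_def, List.singleton_append]
      rw [pvMap_join_shift, pvMap_join_shift]
      simp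
    · simp only [pvDfsA, h, List.nil_append, h1, List.map_append, List.map_map,
        Function.comp_def, List.singleton_append]
      rw [pvMap_join_shift]
      simp

-- ===== VERDICT (by name: the statement is the Claim_ definition above) =====
theorem get_short_forms_spec : Claim_equal_get_short_forms := by
  intro city _
  unfold Spec_get_short_forms get_short_forms get_short_forms_alt
  rw [pvFold_eq]
  simp [pvCat_left_empty]
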